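-- pv_equiv track=rewrite | github.com/Stage-11-Agentics/lattice | scripts/lattice_art.py | make_crystal_3d
-- ===== SOURCE A (Python) =====
-- def make_crystal_3d(cols: int = 40, rows: int = 28) -> list[list[int]]:
--     """Isometric 3D crystal lattice — cubes in perspective."""
--     grid = [[0] * cols for _ in range(rows)]
--
--     # Draw a 3D lattice using simple isometric projection
--     # Horizontal lines
--     for y_node in range(0, rows, 8):
--         for x in range(cols):
--             if y_node < rows:
--                 grid[y_node][x] = 1
--
--     # Vertical lines
--     for x_node in range(0, cols, 10):
--         for y in range(rows):
--             if x_node < cols: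
--                 grid[y][x_node] = 1
--
--     # Diagonal lines (depth)
--     for y_start in range(0, rows, 8):
--         for x_start in range(0, cols, 10):
--             for d in range(min(5, rows - y_start, cols - x_start)):
--                 if y_start + d < rows and x_start + d < cols:
--                     grid[y_start + d][x_start + d] = 1
--
--     return grid
-- ===== SOURCE B (Python) =====
-- def make_crystal_3d(cols: int = 40, rows: int = 28) -> list[list[int]]:
--     """Isometric 3D crystal lattice — one per-cell predicate sweep instead of three mutation passes."""
--     def lit(y: int, x: int) -> int:
--         d = y % 8  # the only possible depth offset for this row
--         if d == 0 or x % 10 == 0 or (d < 5 and d <= x and (x - d) % 10 == 0):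
--             return 1
--         return 0
--     return [[lit(y, x) for x in range(cols)] for y in range(rows)]
-- ===== Notes on version B (the rewrite author's own statement) =====
-- stated objective: simpler
-- what changed: replaces A's three mutation passes over a shared grid (horizontal, vertical, node-anchored diagonals) by a single comprehension computing each cell once from an O(1) per-cell predicate, using that d = y % 8 is the only possible depth-diagonal offset for a row
import Mathlib
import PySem

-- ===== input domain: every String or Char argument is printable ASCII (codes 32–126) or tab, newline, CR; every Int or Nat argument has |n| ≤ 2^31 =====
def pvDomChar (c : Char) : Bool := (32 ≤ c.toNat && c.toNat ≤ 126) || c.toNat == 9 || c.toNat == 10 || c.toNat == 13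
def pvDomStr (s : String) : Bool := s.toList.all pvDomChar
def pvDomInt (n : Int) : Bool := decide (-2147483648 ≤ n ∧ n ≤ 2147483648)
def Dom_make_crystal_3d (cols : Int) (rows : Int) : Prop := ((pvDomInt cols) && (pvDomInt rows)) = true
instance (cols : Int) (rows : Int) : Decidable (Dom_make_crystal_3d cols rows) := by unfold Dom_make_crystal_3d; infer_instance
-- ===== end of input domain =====

-- B replaces A's three in-place drawing passes by a single per-cell predicate comprehension (objective: simpler).

-- ===== PORT A =====
-- grid[y][x] = 1 ; every call site passes 0 ≤ y and 0 ≤ x, so .toNat is exact here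
def pvSet2 (g : List (List Int)) (y x : Int) : List (List Int) :=
  g.modify y.toNat (fun row => row.set x.toNat 1)

def make_crystal_3d (cols : Int) (rows : Int) : List (List Int) :=
  let grid := (PySem.List.pyRange 0 rows 1).map (fun _ => List.replicate cols.toNat (0 : Int))
  let grid := (PySem.List.pyRange 0 rows 8).foldl (fun g y_node =>
      (PySem.List.pyRange 0 cols 1).foldl (fun g x =>
        if y_node < rows then pvSet2 g y_node x else g) g) grid
  let grid := (PySem.List.pyRange 0 cols 10).foldl (fun g x_node =>
      (PySem.List.pyRange 0 rows 1).foldl (fun g y =>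
        if x_node < cols then pvSet2 g y x_node else g) g) grid
  let grid := (PySem.List.pyRange 0 rows 8).foldl (fun g y_start =>
      (PySem.List.pyRange 0 cols 10).foldl (fun g x_start =>
        (PySem.List.pyRange 0 (min 5 (min (rows - y_start) (cols - x_start))) 1).foldl (fun g d =>
          if y_start + d < rows ∧ x_start + d < cols then pvSet2 g (y_start + d) (x_start + d) else g) g) g) grid
  grid

-- ===== PORT B =====
def pvLit (y x : Int) : Int :=
  let d := y % 8
  if d = 0 ∨ x % 10 = 0 ∨ (d < 5 ∧ d ≤ x ∧ (x - d) % 10 = 0) then 1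
  else 0

def make_crystal_3d_alt (cols : Int) (rows : Int) : List (List Int) :=
  (PySem.List.pyRange 0 rows 1).map (fun y => (PySem.List.pyRange 0 cols 1).map (fun x => pvLit y x))

-- ===== PRECONDITION & SPEC =====
def Spec_make_crystal_3d (cols : Int) (rows : Int) (out : List (List Int)) : Prop := out = make_crystal_3d_alt cols rows
instance (cols : Int) (rows : Int) (out : List (List Int)) : Decidable (Spec_make_crystal_3d cols rows out) := by unfold Spec_make_crystal_3d; infer_instance

-- ===== CLAIM (what is proved, stated in full; the proofs are below) =====
def Claim_equal_make_crystal_3d : Prop := ∀ (cols : Int) (rows : Int), Dom_make_crystal_3d cols rows → Spec_make_crystal_3d cols rows (make_crystal_3d cols rows)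

-- ===== LEMMAS AND PROOFS =====

-- reading cell (i, j) of a grid
def pvRead (g : List (List Int)) (i j : Nat) : Option Int :=
  (g[i]?).bind (fun row => row[j]?)

def pvPaint (g : List (List Int)) (p : Int × Int) : List (List Int) :=
  pvSet2 g p.1 p.2

def pvGrid0 (cols rows : Int) : List (List Int) :=
  (PySem.List.pyRange 0 rows 1).map (fun _ => List.replicate cols.toNat (0 : Int))

def pvPs1 (cols rows : Int) : List (Int × Int) :=
  (PySem.List.pyRange 0 rows 8).flatMap (fun y => (PySem.List.pyRange 0 cols 1).map (fun x => (y, x)))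
def pvPs2 (cols rows : Int) : List (Int × Int) :=
  (PySem.List.pyRange 0 cols 10).flatMap (fun x => (PySem.List.pyRange 0 rows 1).map (fun y => (y, x)))
def pvPs3 (cols rows : Int) : List (Int × Int) :=
  (PySem.List.pyRange 0 rows 8).flatMap (fun y =>
    (PySem.List.pyRange 0 cols 10).flatMap (fun x =>
      (PySem.List.pyRange 0 (min 5 (min (rows - y) (cols - x))) 1).map (fun d => (y + d, x + d))))

theorem read_pvSet2 (g : List (List Int)) (y x : Int) (hy : 0 ≤ y) (hx : 0 ≤ x) (i j : Nat) :
    pvRead (pvSet2 g y x) i j =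
      if (i : Int) = y ∧ (j : Int) = x ∧ (pvRead g i j).isSome then some 1 else pvRead g i j := by
  unfold pvRead pvSet2
  rw [List.getElem?_modify]
  rcases hg : g[i]? with _ | row
  · simp
  · show (if y.toNat = i then row.set x.toNat 1 else row)[j]? = _
    by_cases hiy : y.toNat = i
    · rw [if_pos hiy, List.getElem?_set]
      by_cases hjx : x.toNat = j
      · by_cases hlen : x.toNat < row.length
        · have h1 : (i : Int) = y := by omega
          have h2 : (j : Int) = x := by omega
          have h3 : row[j]?.isSome := by
            rw [List.getElem?_eq_getElem (by omega : j < row.length)]; rfl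
          simp [hjx, h1, h2, h3]
          omega
        · have h3 : row[j]? = none := List.getElem?_eq_none (by omega)
          simp [hjx, h3]
          omega
      · have : ¬ ((j : Int) = x) := by omega
        simp [hjx, this]
    · have : ¬ ((i : Int) = y) := by omega
      rw [if_neg hiy]
      simp [this]

theorem read_foldl_paint (ps : List (Int × Int)) (h : ∀ p ∈ ps, 0 ≤ p.1 ∧ 0 ≤ p.2)
    (g : List (List Int)) (i j : Nat) :
    pvRead (ps.foldl pvPaint g) i j =
      if (((i : Int), (j : Int)) ∈ ps ∧ (pvRead g i j).isSome) then some 1 else pvRead g i j := by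
  induction ps generalizing g with
  | nil => simp
  | cons p ps ih =>
    obtain ⟨hp1, hp2⟩ := h p List.mem_cons_self
    rw [List.foldl_cons, ih (fun q hq => h q (List.mem_cons_of_mem _ hq))]
    have hr := read_pvSet2 g p.1 p.2 hp1 hp2 i j
    have hsome : (pvRead (pvSet2 g p.1 p.2) i j).isSome = (pvRead g i j).isSome := by
      rw [hr]
      split_ifs with hc
      · simp [hc.2.2]
      · rfl
    simp only [pvPaint]
    rw [hsome, hr]
    by_cases hmem : ((i : Int), (j : Int)) = p
    · have h1 : (i : Int) = p.1 := by rw [← hmem]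
      have h2 : (j : Int) = p.2 := by rw [← hmem]
      by_cases hs : (pvRead g i j).isSome
      · simp [h1, h2, hs]
      · simp [hs, h1, h2]
    · have : ¬ ((i : Int) = p.1 ∧ (j : Int) = p.2 ∧ (pvRead g i j).isSome) := by
        rintro ⟨a, b, -⟩
        exact hmem (by rw [Prod.ext_iff]; exact ⟨a, b⟩)
      simp only [if_neg this, List.mem_cons]
      by_cases hin : ((i : Int), (j : Int)) ∈ ps <;> simp [hin, hmem]

theorem foldl_paint_flat {α : Type} (ys : List α) (f : α → List (Int × Int)) (g : List (List Int)) :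
    ys.foldl (fun g y => (f y).foldl pvPaint g) g = (ys.flatMap f).foldl pvPaint g := by
  induction ys generalizing g with
  | nil => simp
  | cons y ys ih => simp [List.flatMap_cons, List.foldl_append, ih]

theorem pass1_eq (cols rows : Int) (g : List (List Int)) :
    (PySem.List.pyRange 0 rows 8).foldl (fun g y_node =>
      (PySem.List.pyRange 0 cols 1).foldl (fun g x =>
        if y_node < rows then pvSet2 g y_node x else g) g) g = (pvPs1 cols rows).foldl pvPaint g := by
  unfold pvPs1
  rw [← foldl_paint_flat]
  apply PySem.List.foldl_congr_mem
  intro acc y hy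
  have hlt : y < rows := ((PySem.List.mem_pyRange_iff_of_pos (by norm_num) y).mp hy).2.1
  rw [List.foldl_map]
  simp only [if_pos hlt]
  rfl

theorem pass2_eq (cols rows : Int) (g : List (List Int)) :
    (PySem.List.pyRange 0 cols 10).foldl (fun g x_node =>
      (PySem.List.pyRange 0 rows 1).foldl (fun g y =>
        if x_node < cols then pvSet2 g y x_node else g) g) g = (pvPs2 cols rows).foldl pvPaint g := by
  unfold pvPs2
  rw [← foldl_paint_flat]
  apply PySem.List.foldl_congr_mem
  intro acc x hx
  have hlt : x < cols := ((PySem.List.mem_pyRange_iff_of_pos (by norm_num) x).mp hx).2.1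
  rw [List.foldl_map]
  simp only [if_pos hlt]
  rfl

theorem pass3_eq (cols rows : Int) (g : List (List Int)) :
    (PySem.List.pyRange 0 rows 8).foldl (fun g y_start =>
      (PySem.List.pyRange 0 cols 10).foldl (fun g x_start =>
        (PySem.List.pyRange 0 (min 5 (min (rows - y_start) (cols - x_start))) 1).foldl (fun g d =>
          if y_start + d < rows ∧ x_start + d < cols then pvSet2 g (y_start + d) (x_start + d) else g) g) g) g
      = (pvPs3 cols rows).foldl pvPaint g := by
  unfold pvPs3
  rw [← foldl_paint_flat]
  apply PySem.List.foldl_congr_mem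
  intro acc y hy
  rw [← foldl_paint_flat]
  apply PySem.List.foldl_congr_mem
  intro acc2 x hx
  rw [List.foldl_map]
  apply PySem.List.foldl_congr_mem
  intro acc3 d hd
  have hd' := (PySem.List.mem_pyRange_iff_of_pos (by norm_num) d).mp hd
  have hc : y + d < rows ∧ x + d < cols := by omega
  simp only [if_pos hc]
  rfl

theorem A_as_fold (cols rows : Int) :
    make_crystal_3d cols rows =
      ((pvPs1 cols rows ++ pvPs2 cols rows ++ pvPs3 cols rows)).foldl pvPaint (pvGrid0 cols rows) := by
  rw [List.foldl_append, List.foldl_append]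
  show _ = (pvPs3 cols rows).foldl pvPaint ((pvPs2 cols rows).foldl pvPaint ((pvPs1 cols rows).foldl pvPaint (pvGrid0 cols rows)))
  unfold make_crystal_3d pvGrid0
  dsimp only
  rw [pass1_eq, pass2_eq, pass3_eq]

theorem nonneg_L (cols rows : Int) :
    ∀ p ∈ pvPs1 cols rows ++ pvPs2 cols rows ++ pvPs3 cols rows, 0 ≤ p.1 ∧ 0 ≤ p.2 := by
  intro p hp
  simp only [List.mem_append, pvPs1, pvPs2, pvPs3, List.mem_flatMap, List.mem_map] at hp
  rcases hp with (⟨y, hy, x, hx, rfl⟩ | ⟨x, hx, y, hy, rfl⟩) | ⟨y, hy, x, hx, d, hd, rfl⟩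
  · have h1 := (PySem.List.mem_pyRange_iff_of_pos (by norm_num) y).mp hy
    have h2 := (PySem.List.mem_pyRange_iff_of_pos (by norm_num) x).mp hx
    exact ⟨h1.1, h2.1⟩
  · have h1 := (PySem.List.mem_pyRange_iff_of_pos (by norm_num) x).mp hx
    have h2 := (PySem.List.mem_pyRange_iff_of_pos (by norm_num) y).mp hy
    exact ⟨h2.1, h1.1⟩
  · have h1 := (PySem.List.mem_pyRange_iff_of_pos (by norm_num) y).mp hy
    have h2 := (PySem.List.mem_pyRange_iff_of_pos (by norm_num) x).mp hx
    have h3 := (PySem.List.mem_pyRange_iff_of_pos (by norm_num) d).mp hd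
    constructor <;> simp <;> omega

theorem mem_L_iff (cols rows I J : Int) (hI0 : 0 ≤ I) (hIr : I < rows) (hJ0 : 0 ≤ J) (hJc : J < cols) :
    ((I, J) ∈ pvPs1 cols rows ++ pvPs2 cols rows ++ pvPs3 cols rows) ↔
      (I % 8 = 0 ∨ J % 10 = 0 ∨
        ∃ d, 0 ≤ d ∧ d < 5 ∧ d ≤ I ∧ d ≤ J ∧ (I - d) % 8 = 0 ∧ (J - d) % 10 = 0) := by
  simp only [List.mem_append, pvPs1, pvPs2, pvPs3, List.mem_flatMap, List.mem_map, Prod.mk.injEq]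
  constructor
  · rintro ((⟨y, hy, x, hx, rfl, rfl⟩ | ⟨x, hx, y, hy, rfl, rfl⟩) | ⟨y, hy, x, hx, d, hd, h1, h2⟩)
    · have h1 := (PySem.List.mem_pyRange_iff_of_pos (by norm_num) y).mp hy
      left; omega
    · have h1 := (PySem.List.mem_pyRange_iff_of_pos (by norm_num) x).mp hx
      right; left; omega
    · have hy' := (PySem.List.mem_pyRange_iff_of_pos (by norm_num) y).mp hy
      have hx' := (PySem.List.mem_pyRange_iff_of_pos (by norm_num) x).mp hx
      have hd' := (PySem.List.mem_pyRange_iff_of_pos (by norm_num) d).mp hd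
      right; right
      exact ⟨d, by omega, by omega, by omega, by omega, by omega, by omega⟩
  · rintro (h8 | h10 | ⟨d, h0, h5, hdI, hdJ, h8, h10⟩)
    · left; left
      exact ⟨I, (PySem.List.mem_pyRange_iff_of_pos (by norm_num) I).mpr ⟨hI0, hIr, by omega⟩,
             J, (PySem.List.mem_pyRange_iff_of_pos (by norm_num) J).mpr ⟨hJ0, hJc, by omega⟩, rfl, rfl⟩
    · left; right
      exact ⟨J, (PySem.List.mem_pyRange_iff_of_pos (by norm_num) J).mpr ⟨hJ0, hJc, by omega⟩,
             I, (PySem.List.mem_pyRange_iff_of_pos (by norm_num) I).mpr ⟨hI0, hIr, by omega⟩, rfl, rfl⟩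
    · right
      refine ⟨I - d, (PySem.List.mem_pyRange_iff_of_pos (by norm_num) _).mpr ⟨by omega, by omega, by omega⟩,
              J - d, (PySem.List.mem_pyRange_iff_of_pos (by norm_num) _).mpr ⟨by omega, by omega, by omega⟩,
              d, (PySem.List.mem_pyRange_iff_of_pos (by norm_num) _).mpr ⟨by omega, by omega, by omega⟩,
              by omega, by omega⟩

theorem pvLit_zero_or_one (I J : Int) : pvLit I J = 0 ∨ pvLit I J = 1 := by
  unfold pvLit
  dsimp only
  split_ifs <;> simp

theorem pvLit_one_iff (I J : Int) (hI : 0 ≤ I) :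
    pvLit I J = 1 ↔ (I % 8 = 0 ∨ J % 10 = 0 ∨
      ∃ d, 0 ≤ d ∧ d < 5 ∧ d ≤ I ∧ d ≤ J ∧ (I - d) % 8 = 0 ∧ (J - d) % 10 = 0) := by
  unfold pvLit
  dsimp only
  split_ifs with h
  · constructor
    · intro _
      rcases h with h | h | ⟨h5, hx, h10⟩
      · exact Or.inl h
      · exact Or.inr (Or.inl h)
      · exact Or.inr (Or.inr ⟨I % 8, by omega, by omega, by omega, by omega, by omega, by omega⟩)
    · intro _; rfl
  · constructor
    · intro h01; exact absurd h01 (by norm_num)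
    · rintro (h8 | h10 | ⟨d, h0, h5, hdI, hdJ, h8, h10⟩)
      · exact absurd (Or.inl h8) h
      · exact absurd (Or.inr (Or.inl h10)) h
      · have hd : d = I % 8 := by omega
        exact absurd (Or.inr (Or.inr ⟨by omega, by omega, by omega⟩)) h

theorem read_grid0 (cols rows : Int) (i j : Nat) :
    pvRead (pvGrid0 cols rows) i j = if ((i : Int) < rows ∧ (j : Int) < cols) then some 0 else none := by
  unfold pvRead pvGrid0
  rw [List.getElem?_map, PySem.List.getElem?_pyRange_one]
  by_cases hi : i < (rows - 0).toNat
  · rw [if_pos hi]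
    simp only [Option.map_some, Option.bind_some, List.getElem?_replicate]
    by_cases hj : j < cols.toNat
    · rw [if_pos hj, if_pos (by omega)]
    · rw [if_neg hj, if_neg (by omega)]
  · rw [if_neg hi]
    simp only [Option.map_none, Option.bind_none]
    rw [if_neg (by omega)]

theorem length_foldl_paint (ps : List (Int × Int)) (g : List (List Int)) :
    (ps.foldl pvPaint g).length = g.length := by
  induction ps generalizing g with
  | nil => rfl
  | cons p ps ih => rw [List.foldl_cons, ih]; simp [pvPaint, pvSet2]

theorem make_crystal_3d_spec' (cols rows : Int) :
    make_crystal_3d cols rows = make_crystal_3d_alt cols rows := by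
  rw [A_as_fold]
  unfold make_crystal_3d_alt
  have hlen : ((pvPs1 cols rows ++ pvPs2 cols rows ++ pvPs3 cols rows).foldl pvPaint (pvGrid0 cols rows)).length = (rows - 0).toNat := by
    rw [length_foldl_paint]
    unfold pvGrid0
    rw [List.length_map, PySem.List.length_pyRange_one]
  apply List.ext_getElem?
  intro i
  rw [List.getElem?_map, PySem.List.getElem?_pyRange_one]
  by_cases hi : i < (rows - 0).toNat
  · have hAlt : i < ((pvPs1 cols rows ++ pvPs2 cols rows ++ pvPs3 cols rows).foldl pvPaint (pvGrid0 cols rows)).length := by omega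
    rw [List.getElem?_eq_getElem hAlt, if_pos hi]
    congr 1
    apply List.ext_getElem?
    intro j
    have hread : (((pvPs1 cols rows ++ pvPs2 cols rows ++ pvPs3 cols rows).foldl pvPaint (pvGrid0 cols rows))[i])[j]?
        = pvRead ((pvPs1 cols rows ++ pvPs2 cols rows ++ pvPs3 cols rows).foldl pvPaint (pvGrid0 cols rows)) i j := by
      unfold pvRead
      rw [List.getElem?_eq_getElem hAlt]
      rfl
    rw [hread, read_foldl_paint _ (nonneg_L cols rows) _ i j, read_grid0,
        List.getElem?_map, PySem.List.getElem?_pyRange_one]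
    by_cases hj : j < (cols - 0).toNat
    · rw [if_pos hj]
      have hb : ((i : Int) < rows ∧ (j : Int) < cols) := by omega
      rw [if_pos hb]
      simp only [Option.isSome_some, and_true, zero_add, Option.map_some]
      by_cases hm : ((i : Int), (j : Int)) ∈ pvPs1 cols rows ++ pvPs2 cols rows ++ pvPs3 cols rows
      · rw [if_pos hm]
        have h1 : pvLit (i : Int) (j : Int) = 1 :=
          (pvLit_one_iff _ _ (Int.natCast_nonneg i)).mpr ((mem_L_iff cols rows i j (Int.natCast_nonneg i) hb.1 (Int.natCast_nonneg j) hb.2).mp hm)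
        rw [h1]
      · rw [if_neg hm]
        rcases pvLit_zero_or_one (i : Int) (j : Int) with h0 | h1
        · rw [h0]
        · exact absurd ((mem_L_iff cols rows i j (Int.natCast_nonneg i) hb.1 (Int.natCast_nonneg j) hb.2).mpr
            ((pvLit_one_iff _ _ (Int.natCast_nonneg i)).mp h1)) hm
    · rw [if_neg hj]
      have hb : ¬ ((i : Int) < rows ∧ (j : Int) < cols) := by omega
      rw [if_neg hb]
      simp
  · rw [if_neg hi, List.getElem?_eq_none (by omega)]
    simp

-- ===== VERDICT (by name: the statement is the Claim_ definition above) =====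
theorem make_crystal_3d_spec : Claim_equal_make_crystal_3d := by
  intro cols rows _
  exact make_crystal_3d_spec' cols rows
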